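-- pv_equiv track=rewrite | github.com/SirDavidLudwig/advent-of-code-solutions | solutions/2024/09/part2_old.py | find_file_ids
-- ===== SOURCE A (Python) =====
-- def find_file_ids(data):
--     i = len(data) - 1
--     j = len(data) - 1
--     while i >= 0:
--         while i >= 0 and data[i] == data[j]:
--             i -= 1
--         if data[i+1] != -1:
--             yield (data[i+1], i+1, j-i)
--         j = i
-- ===== SOURCE B (Python) =====
-- def find_file_ids(data):
--     runs = []
--     n = len(data)
--     start = 0
--     while start < n:
--         v = data[start]
--         end = start
--         while end < n and data[end] == v:
--             end += 1
--         if v != -1: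
--             runs.append((v, start, end - start))
--         start = end
--     yield from reversed(runs)
-- ===== Notes on version B (the rewrite author's own statement) =====
-- stated objective: alternative
-- what changed: Replaces A's backward two-pointer streaming pass with a forward grouping pass that collects (value, start, length) run tuples into a buffer and then emits them reversed.
import Mathlib
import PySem

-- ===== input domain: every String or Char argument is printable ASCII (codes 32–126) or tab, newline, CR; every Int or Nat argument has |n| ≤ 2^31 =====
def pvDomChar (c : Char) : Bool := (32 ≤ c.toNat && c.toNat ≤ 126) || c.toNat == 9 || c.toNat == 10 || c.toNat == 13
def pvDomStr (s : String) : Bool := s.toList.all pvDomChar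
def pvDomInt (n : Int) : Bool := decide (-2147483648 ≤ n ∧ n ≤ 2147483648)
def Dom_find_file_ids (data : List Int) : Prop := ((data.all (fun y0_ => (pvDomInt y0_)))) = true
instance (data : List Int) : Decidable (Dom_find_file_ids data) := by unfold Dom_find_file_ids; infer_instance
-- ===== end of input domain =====

-- B replaces A's backward two-pointer streaming pass by a forward grouping pass that buffers
-- run tuples and emits them reversed (alternative decomposition; same output, same O(n) cost).
-- Note: A is a Python generator; both ports return the list of yielded tuples.

-- ===== PORT A =====
-- Inner `while i >= 0 and data[i] == data[j]` loop. Indices are encoded as k = i+1 (a Nat),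
-- so `i >= 0` becomes `k ≥ 1`; all indexing in A's actual executions is in range, so getD is exact.
def findA_skip (data : List Int) (v : Int) : Nat → Nat
  | 0 => 0
  | k + 1 => if data.getD k 0 = v then findA_skip data v k else k + 1

theorem findA_skip_le (data : List Int) (v : Int) (k : Nat) : findA_skip data v k ≤ k := by
  induction k with
  | zero => simp [findA_skip]
  | succ m ih => unfold findA_skip; split <;> omega

theorem findA_skip_lt (data : List Int) (k : Nat) (hk : k ≠ 0) :
    findA_skip data (data.getD (k - 1) 0) k < k := by
  have h := findA_skip_le data (data.getD (k - 1) 0) (k - 1)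
  obtain ⟨m, rfl⟩ : ∃ m, k = m + 1 := ⟨k - 1, by omega⟩
  simp only [Nat.add_sub_cancel] at h ⊢
  unfold findA_skip
  rw [if_pos rfl]
  omega

-- Outer `while i >= 0` loop. In A, `j = i` is executed at the end of each iteration and j is
-- initialised to i's initial value, so j = k - 1 holds at every loop head; we use that index
-- directly instead of carrying j as a second parameter.
def findA_outer (data : List Int) (k : Nat) : List (Int × Int × Int) :=
  if hk : k = 0 then []
  else
    -- inner loop runs with v = data[j], j = k - 1; its result is i+1 (inlined below)
    -- `if data[i+1] != -1: yield (data[i+1], i+1, j-i)` with i+1 = findA_skip …, j-i = k - (i+1)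
    if data.getD (findA_skip data (data.getD (k - 1) 0) k) 0 ≠ -1 then
      (data.getD (findA_skip data (data.getD (k - 1) 0) k) 0,
        ((findA_skip data (data.getD (k - 1) 0) k : Int)),
        ((k : Int) - (findA_skip data (data.getD (k - 1) 0) k : Int)))
        :: findA_outer data (findA_skip data (data.getD (k - 1) 0) k)
    else findA_outer data (findA_skip data (data.getD (k - 1) 0) k)
  termination_by k
  decreasing_by all_goals exact findA_skip_lt data k hk

def find_file_ids (data : List Int) : List (Int × Int × Int) :=
  findA_outer data data.length

-- ===== PORT B =====
-- inner `while end < n and data[end] == v: end += 1`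
def findB_runEnd (data : List Int) (n : Nat) (v : Int) (e : Nat) : Nat :=
  if e < n ∧ data.getD e 0 = v then findB_runEnd data n v (e + 1) else e
  termination_by n - e
  decreasing_by omega

theorem findB_runEnd_ge (data : List Int) (n : Nat) (v : Int) (e : Nat) :
    e ≤ findB_runEnd data n v e := by
  fun_induction findB_runEnd with
  | case1 e h ih => omega
  | case2 e h => omega

theorem findB_runEnd_gt (data : List Int) (n : Nat) (s : Nat) (h : s < n) :
    s < findB_runEnd data n (data.getD s 0) s := by
  rw [findB_runEnd, if_pos ⟨h, rfl⟩]
  have := findB_runEnd_ge data n (data.getD s 0) (s + 1)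
  omega

-- outer `while start < n` loop building `runs` front-to-back
def findB_runs (data : List Int) (n : Nat) (start : Nat) : List (Int × Int × Int) :=
  -- Source B's locals v = data[start] and end = runEnd are inlined (same values)
  if h : start < n then
    (if data.getD start 0 ≠ -1 then
      [(data.getD start 0, (start : Int),
        ((findB_runEnd data n (data.getD start 0) start : Int) - (start : Int)))]
     else []) ++ findB_runs data n (findB_runEnd data n (data.getD start 0) start)
  else []
  termination_by n - start
  decreasing_by
    have := findB_runEnd_gt data n start h
    omega

def find_file_ids_alt (data : List Int) : List (Int × Int × Int) :=
  (findB_runs data data.length 0).reverse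

-- ===== PRECONDITION & SPEC =====
def Spec_find_file_ids (data : List Int) (out : List (Int × Int × Int)) : Prop := out = find_file_ids_alt data
instance (data : List Int) (out : List (Int × Int × Int)) : Decidable (Spec_find_file_ids data out) := by unfold Spec_find_file_ids; infer_instance

-- ===== CLAIM (what is proved, stated in full; the proofs are below) =====
def Claim_equal_find_file_ids : Prop := ∀ (data : List Int), Dom_find_file_ids data → Spec_find_file_ids data (find_file_ids data)

-- ===== LEMMAS AND PROOFS =====

-- properties of A's inner loop: only v-values lie at or above its landing point …
theorem findA_skip_run (data : List Int) (v : Int) (k : Nat) :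
    ∀ j, findA_skip data v k ≤ j → j < k → data.getD j 0 = v := by
  induction k with
  | zero => omega
  | succ m ih =>
    intro j h1 h2
    unfold findA_skip at h1
    split at h1
    · rcases Nat.lt_or_ge j m with hj | hj
      · exact ih j h1 hj
      · have : j = m := by omega
        subst this; assumption
    · omega

-- … and it lands at 0 or just past a non-v value (a run boundary)
theorem findA_skip_boundary (data : List Int) (v : Int) (k : Nat) :
    findA_skip data v k = 0 ∨ data.getD (findA_skip data v k - 1) 0 ≠ v := by
  induction k with
  | zero => left; simp [findA_skip]
  | succ m ih =>
    unfold findA_skip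
    split
    · exact ih
    · right; simpa

-- properties of B's inner loop
theorem findB_runEnd_vals (data : List Int) (n : Nat) (v : Int) (e : Nat) :
    ∀ j, e ≤ j → j < findB_runEnd data n v e → data.getD j 0 = v := by
  fun_induction findB_runEnd with
  | case1 e h ih =>
    intro j h1 h2
    rcases Nat.lt_or_ge j (e + 1) with hj | hj
    · have : j = e := by omega
      subst this; exact h.2
    · exact ih j hj h2
  | case2 e h => intro j h1 h2; omega

theorem findB_runEnd_full (data : List Int) (n : Nat) (v : Int) (e : Nat)
    (he : e ≤ n) (hall : ∀ j, e ≤ j → j < n → data.getD j 0 = v) :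
    findB_runEnd data n v e = n := by
  fun_induction findB_runEnd with
  | case1 e h ih => exact ih (by omega) (fun j h1 h2 => hall j (by omega) h2)
  | case2 e h =>
    by_contra hne
    have hlt : e < n := by omega
    exact h ⟨hlt, hall e (le_refl e) hlt⟩

-- two bounds agree when the result stays below the smaller bound
theorem findB_runEnd_bound_agree (data : List Int) (n n' : Nat) (v : Int) (e : Nat)
    (hn : n' ≤ n) (hres : findB_runEnd data n v e ≤ n') :
    findB_runEnd data n' v e = findB_runEnd data n v e := by
  fun_induction findB_runEnd data n v e with
  | case1 e h ih =>
    have hge := findB_runEnd_ge data n v (e + 1)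
    rw [findB_runEnd]
    rw [if_pos ⟨by omega, h.2⟩]
    exact ih hres
  | case2 e h =>
    rw [findB_runEnd]
    rw [if_neg (fun hc => h ⟨by omega, hc.2⟩)]

-- split lemma: extending the bound from k' to k across a maximal run of value v
-- appends exactly that run's tuple at the end of the forward pass
theorem findB_runs_split (data : List Int) (k k' : Nat) (v : Int)
    (hk : k' < k)
    (hrun : ∀ j, k' ≤ j → j < k → data.getD j 0 = v)
    (hbd : k' = 0 ∨ data.getD (k' - 1) 0 ≠ v) :
    ∀ s, s ≤ k' →
      findB_runs data k s =
        findB_runs data k' s ++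
          (if v ≠ -1 then [(v, (k' : Int), ((k : Int) - (k' : Int)))] else []) := by
  intro s hs
  induction hn : k' - s using Nat.strong_induction_on generalizing s with
  | _ m ih =>
  rcases Nat.eq_or_lt_of_le hs with hEq | hlt
  · -- base: s = k'
    subst hEq
    have hv : data.getD s 0 = v := hrun s (le_refl s) hk
    have hfull : findB_runEnd data k (data.getD s 0) s = k := by
      rw [hv]; exact findB_runEnd_full data k v s (by omega) hrun
    rw [findB_runs, dif_pos hk, hfull, hv]
    rw [show findB_runs data s s = [] from by rw [findB_runs, dif_neg (by omega)]]
    rw [show findB_runs data k k = [] from by rw [findB_runs, dif_neg (by omega)]]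
    simp
  · -- step: s < k'
    have hsk : s < k := by omega
    have hle' : findB_runEnd data k (data.getD s 0) s ≤ k' := by
      by_contra hgt'
      have h1 : data.getD (k' - 1) 0 = data.getD s 0 :=
        findB_runEnd_vals data k (data.getD s 0) s (k' - 1) (by omega) (by omega)
      have h2 : data.getD k' 0 = data.getD s 0 :=
        findB_runEnd_vals data k (data.getD s 0) s k' (by omega) (by omega)
      have h3 : data.getD k' 0 = v := hrun k' (le_refl k') hk
      rcases hbd with h0 | hne
      · omega
      · exact hne ((h1.trans h2.symm).trans h3)
    have e_def : findB_runEnd data k' (data.getD s 0) s = findB_runEnd data k (data.getD s 0) s :=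
      findB_runEnd_bound_agree data k k' (data.getD s 0) s (by omega) hle'
    have hgt : s < findB_runEnd data k (data.getD s 0) s := findB_runEnd_gt data k s hsk
    rw [findB_runs, dif_pos hsk]
    rw [show findB_runs data k' s = _ from by rw [findB_runs, dif_pos hlt]]
    simp only [e_def]
    rw [ih (k' - findB_runEnd data k (data.getD s 0) s) (by omega)
          (findB_runEnd data k (data.getD s 0) s) hle' rfl]
    simp [List.append_assoc]

-- main lemma: A's backward accumulation over the prefix bound k is the reverse of
-- B's forward pass with the same bound
theorem findA_outer_eq (data : List Int) (k : Nat) :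
    findA_outer data k = (findB_runs data k 0).reverse := by
  induction k using Nat.strong_induction_on with
  | _ k ih =>
  by_cases hk : k = 0
  · subst hk
    rw [findA_outer, findB_runs]
    simp
  · rw [findA_outer, dif_neg hk]
    set v := data.getD (k - 1) 0 with hv
    set k' := findA_skip data v k with hk'
    have hlt : k' < k := findA_skip_lt data k hk
    have hrun : ∀ j, k' ≤ j → j < k → data.getD j 0 = v := findA_skip_run data v k
    have hbd : k' = 0 ∨ data.getD (k' - 1) 0 ≠ v := findA_skip_boundary data v k
    have hsplit := findB_runs_split data k k' v hlt hrun hbd 0 (by omega)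
    rw [hsplit, ih k' hlt]
    have hvk' : data.getD k' 0 = v := hrun k' (le_refl k') hlt
    simp only [hvk']
    by_cases hvm : v = -1
    · simp [hvm]
    · simp [hvm]

-- ===== VERDICT (by name: the statement is the Claim_ definition above) =====
theorem find_file_ids_spec : Claim_equal_find_file_ids := by
  intro data _
  unfold Spec_find_file_ids find_file_ids find_file_ids_alt
  exact findA_outer_eq data data.length
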